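-- pv_equiv track=rewrite | github.com/Hyojeong721/TIL | algorithm/SWA/date/1005/gudtjs0428/컨테이너운반/s1.py | get_greatest_weight
-- ===== SOURCE A (Python) =====
-- def get_greatest_weight(N, M, freights, trucks):
--     freights.sort(reverse=True)
--     trucks.sort(reverse=True)
--     weight = 0
--     while freights and trucks:
--         truck = trucks[0]
--         freight = freights.pop(0)
--         if truck >= freight:
--             weight += freight
--             trucks.pop(0)
--     else:
--         return weight
-- ===== SOURCE B (Python) =====
-- def get_greatest_weight(N, M, freights, trucks):
--     fs = sorted(freights, reverse=True)
--     ts = sorted(trucks, reverse=True)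
--     weight = 0
--     i = 0
--     for t in ts:
--         while i < len(fs) and fs[i] > t:
--             i += 1
--         if i == len(fs):
--             break
--         weight += fs[i]
--         i += 1
--     return weight
-- ===== Notes on version B (the rewrite author's own statement) =====
-- stated objective: faster
-- what changed: Replaces the pop(0)-driven while loop over the freight list with a two-pointer sweep: an outer loop over sorted trucks advancing a single index into the sorted freight list, so no list mutation and no O(N) pops; B also does not mutate its arguments (A sorts both lists in place).
import Mathlib
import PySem

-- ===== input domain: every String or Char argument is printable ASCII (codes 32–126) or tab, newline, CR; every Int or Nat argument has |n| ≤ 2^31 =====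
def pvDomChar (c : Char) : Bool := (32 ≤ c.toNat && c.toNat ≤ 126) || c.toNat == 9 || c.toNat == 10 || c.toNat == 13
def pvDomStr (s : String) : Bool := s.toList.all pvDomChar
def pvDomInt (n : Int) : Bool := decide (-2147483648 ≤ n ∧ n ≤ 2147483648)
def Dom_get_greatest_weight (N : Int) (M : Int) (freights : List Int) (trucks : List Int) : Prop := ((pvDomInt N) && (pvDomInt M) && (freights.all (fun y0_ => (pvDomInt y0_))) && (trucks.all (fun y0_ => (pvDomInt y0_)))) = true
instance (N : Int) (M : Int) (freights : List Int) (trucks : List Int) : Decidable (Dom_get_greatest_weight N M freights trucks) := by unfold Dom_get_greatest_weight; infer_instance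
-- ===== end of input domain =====

-- B replaces A's pop(0)-driven while loop with a two-pointer sweep over the sorted lists (objective: faster,
-- O(N log N) vs O(N^2)); the Python A sorts both argument lists in place — the equivalence here is about the
-- return value only (B does not mutate its arguments).

-- ===== PORT A =====
-- A's while loop: state is (remaining freights, remaining trucks, weight); pop(0) drops the head.
def gwLoopA : List Int → List Int → Int → Int
  | [], _, w => w
  | _ :: _, [], w => w
  | f :: fs, t :: ts, w =>
      if t ≥ f then gwLoopA fs ts (w + f) else gwLoopA fs (t :: ts) w

def get_greatest_weight (N : Int) (M : Int) (freights : List Int) (trucks : List Int) : Int :=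
  gwLoopA (PySem.List.sorted freights (fun x => x) true)
          (PySem.List.sorted trucks (fun x => x) true) 0

-- ===== PORT B =====
-- B's inner `while i < len(fs) and fs[i] > t: i += 1`; the running index into fs is represented by the
-- remaining suffix of fs (advancing i = dropping the head).
def gwSkipB (t : Int) : List Int → List Int
  | [] => []
  | f :: fs => if f > t then gwSkipB t fs else f :: fs

-- B's `for t in ts` loop carrying (freight suffix, weight); an exhausted freight list is the `break`.
def gwLoopB : List Int → List Int → Int → Int
  | [], _, w => w
  | t :: ts, fs, w =>
      match gwSkipB t fs with
      | [] => w
      | f :: fs' => gwLoopB ts fs' (w + f)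

def get_greatest_weight_alt (N : Int) (M : Int) (freights : List Int) (trucks : List Int) : Int :=
  gwLoopB (PySem.List.sorted trucks (fun x => x) true)
          (PySem.List.sorted freights (fun x => x) true) 0

-- ===== PRECONDITION & SPEC =====
def Spec_get_greatest_weight (N : Int) (M : Int) (freights : List Int) (trucks : List Int) (out : Int) : Prop := out = get_greatest_weight_alt N M freights trucks
instance (N : Int) (M : Int) (freights : List Int) (trucks : List Int) (out : Int) : Decidable (Spec_get_greatest_weight N M freights trucks out) := by unfold Spec_get_greatest_weight; infer_instance

-- ===== CLAIM (what is proved, stated in full; the proofs are below) =====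
def Claim_equal_get_greatest_weight : Prop := ∀ (N : Int) (M : Int) (freights : List Int) (trucks : List Int), Dom_get_greatest_weight N M freights trucks → Spec_get_greatest_weight N M freights trucks (get_greatest_weight N M freights trucks)

-- ===== LEMMAS AND PROOFS =====

-- A's loop over (fs, ts) and B's loop over (ts, fs) compute the same value: A's "skip this freight"
-- branch is exactly one step of B's inner skip.
theorem gwLoop_eq (fs : List Int) : ∀ (ts : List Int) (w : Int), gwLoopA fs ts w = gwLoopB ts fs w := by
  induction fs with
  | nil =>
      intro ts w
      cases ts with
      | nil => rfl
      | cons t ts => simp [gwLoopA, gwLoopB, gwSkipB]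
  | cons f fs ih =>
      intro ts w
      cases ts with
      | nil => rfl
      | cons t ts =>
          by_cases h : t ≥ f
          · have hnot : ¬ f > t := by omega
            simp [gwLoopA, gwLoopB, gwSkipB, h, hnot, ih]
          · have hgt : f > t := by omega
            have := ih (t :: ts) w
            simp [gwLoopA, gwLoopB, gwSkipB, h, hgt] at this ⊢
            simpa [gwLoopB] using this

-- ===== VERDICT (by name: the statement is the Claim_ definition above) =====
theorem get_greatest_weight_spec : Claim_equal_get_greatest_weight := by
  intro N M freights trucks _
  unfold Spec_get_greatest_weight get_greatest_weight get_greatest_weight_alt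
  exact gwLoop_eq _ _ _
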